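-- pv_equiv track=rewrite | github.com/rijualjain/10-coding-questions-in-javascript-and-python | q8.py | permutations_generator
-- ===== SOURCE A (Python) =====
-- def permutations_generator(s: str) -> int:
--
--     unique_words = set()
--
--
--     def generate_permutations(s: str, prefix: str):
--         if len(prefix) == 5:
--             unique_words.add(prefix)
--             return
--
--         for i, c in enumerate(s):
--             generate_permutations(s[:i] + s[i+1:], prefix + c)
--
--     generate_permutations(s, '')
--     return unique_words
-- ===== SOURCE B (Python) =====
-- def permutations_generator(s: str) -> int:
--     # Iterative level-by-level expansion: each level holds (prefix, remaining chars);
--     # after 5 rounds the prefixes are exactly the length-5 arrangements.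
--     level = [('', s)]
--     for _ in range(5):
--         level = [(pre + c, rest[:i] + rest[i + 1:])
--                  for pre, rest in level
--                  for i, c in enumerate(rest)]
--     return {pre for pre, _ in level}
-- ===== Notes on version B (the rewrite author's own statement) =====
-- stated objective: alternative
-- what changed: Replaces the recursive DFS helper mutating a closure-captured set with an iterative breadth-first expansion: a list of (prefix, remaining) pairs is rewritten by a comprehension five times, then the prefixes are collected into a set.
import Mathlib
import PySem

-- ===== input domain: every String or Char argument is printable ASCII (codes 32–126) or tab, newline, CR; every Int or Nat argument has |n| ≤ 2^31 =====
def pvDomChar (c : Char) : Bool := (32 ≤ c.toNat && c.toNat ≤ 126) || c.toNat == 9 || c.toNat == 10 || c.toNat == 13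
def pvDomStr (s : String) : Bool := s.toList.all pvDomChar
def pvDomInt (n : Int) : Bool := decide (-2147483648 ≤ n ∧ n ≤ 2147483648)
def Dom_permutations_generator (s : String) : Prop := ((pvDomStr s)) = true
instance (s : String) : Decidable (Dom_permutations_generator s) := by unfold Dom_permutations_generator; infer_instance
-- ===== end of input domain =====

-- B replaces A's recursive DFS helper (mutating a closure-captured set) by an iterative
-- level-by-level expansion of (prefix, remaining) pairs; alternative decomposition, same cost.

-- ===== PORT A =====
-- recursive helper generate_permutations; the fuel parameter (always ≥ len s, since each
-- recursive call removes one character) only makes the recursion structurally total: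
-- fuel = 0 is reached only with s = [], where the Python for-loop body never runs anyway.
def pvGenPerms (fuel : Nat) (s : List Char) (pre : List Char) (acc : PySem.Set String) : PySem.Set String :=
  if pre.length = 5 then PySem.Set.add acc (String.ofList pre)
  else
    match fuel with
    | 0 => acc
    | fuel' + 1 =>
      (PySem.List.enumerate s).foldl
        (fun a ic =>
          pvGenPerms fuel'
            (PySem.List.slice s none (some ic.1) ++ PySem.List.slice s (some (ic.1 + 1)) none)
            (pre ++ [ic.2]) a) acc

def permutations_generator (s : String) : List String :=
  pvGenPerms s.toList.length s.toList [] PySem.Set.empty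

-- ===== PORT B =====
-- one comprehension pass: expand every (prefix, remaining) pair at each position of remaining
def pvStep (level : List (List Char × List Char)) : List (List Char × List Char) :=
  level.flatMap (fun pr =>
    (PySem.List.enumerate pr.2).map (fun ic =>
      (pr.1 ++ [ic.2],
       PySem.List.slice pr.2 none (some ic.1) ++ PySem.List.slice pr.2 (some (ic.1 + 1)) none)))

def permutations_generator_alt (s : String) : List String :=
  PySem.Set.ofList
    (((PySem.List.pyRange 0 5 1).foldl (fun lv _ => pvStep lv) [(([] : List Char), s.toList)]).map
      (fun pr => String.ofList pr.1))

-- ===== PRECONDITION & SPEC =====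
def Spec_permutations_generator (s : String) (out : List String) : Prop := out = permutations_generator_alt s
instance (s : String) (out : List String) : Decidable (Spec_permutations_generator s out) := by unfold Spec_permutations_generator; infer_instance

-- ===== CLAIM (what is proved, stated in full; the proofs are below) =====
def Claim_equal_permutations_generator : Prop := ∀ (s : String), Dom_permutations_generator s → Spec_permutations_generator s (permutations_generator s)

-- ===== LEMMAS AND PROOFS =====

-- proof-only: the tree of (chosen prefix, leftover characters) after n rounds of choosing
def pvPermsP : Nat → List Char → List (List Char × List Char)
  | 0, s => [([], s)]
  | n + 1, s =>
    (PySem.List.enumerate s).flatMap (fun ic =>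
      (pvPermsP n (PySem.List.slice s none (some ic.1) ++ PySem.List.slice s (some (ic.1 + 1)) none)).map
        (fun q => (ic.2 :: q.1, q.2)))

theorem pv_rem_eq (s : List Char) (k : Nat) :
    PySem.List.slice s none (some (k : Int)) ++ PySem.List.slice s (some ((k : Int) + 1)) none
      = s.take k ++ s.drop (k + 1) := by
  have h : ((k : Int) + 1) = ((k + 1 : Nat) : Int) := by push_cast; ring
  rw [PySem.List.slice_to_natCast, h, PySem.List.slice_from_natCast]

theorem pv_foldl_flatMap {α β γ : Type} (l : List α) (g : α → List β) (f : γ → β → γ) (init : γ) :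
    (l.flatMap g).foldl f init = l.foldl (fun a x => (g x).foldl f a) init := by
  induction l generalizing init with
  | nil => rfl
  | cons x xs ih => simp [List.foldl_append, ih]

theorem pv_iter_additive (n : Nat) (l : List (List Char × List Char)) :
    pvStep^[n] l = l.flatMap (fun pr => pvStep^[n] [pr]) := by
  induction n generalizing l with
  | zero => simp
  | succ n ih =>
    have h1 : (fun pr => pvStep^[n + 1] [pr])
        = fun pr => (pvStep [pr]).flatMap (fun pr' => pvStep^[n] [pr']) := by
      funext pr
      rw [Function.iterate_succ_apply, ih]
    rw [h1, Function.iterate_succ_apply, ih]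
    simp [pvStep, List.flatMap_assoc]

theorem pv_iter_single (n : Nat) (pre rest : List Char) :
    pvStep^[n] [(pre, rest)] = (pvPermsP n rest).map (fun q => (pre ++ q.1, q.2)) := by
  induction n generalizing pre rest with
  | zero => simp [pvPermsP]
  | succ n ih =>
    rw [Function.iterate_succ_apply]
    have hstep : pvStep [(pre, rest)] =
        (PySem.List.enumerate rest).map (fun ic =>
          (pre ++ [ic.2],
           PySem.List.slice rest none (some ic.1) ++ PySem.List.slice rest (some (ic.1 + 1)) none)) := by
      simp [pvStep]
    rw [hstep, pv_iter_additive, List.flatMap_map]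
    simp only [ih, pvPermsP, List.map_flatMap, List.map_map]
    congr 1
    funext ic
    congr 1
    funext q
    simp [List.append_assoc]

theorem pv_foldl_const_step (l : List Int) (lv : List (List Char × List Char)) :
    List.foldl (fun lv _ => pvStep lv) lv l = pvStep^[l.length] lv := by
  induction l generalizing lv with
  | nil => rfl
  | cons x xs ih => simp [Function.iterate_succ_apply, ih]

theorem pv_gen_eq (fuel : Nat) (s pre : List Char) (acc : PySem.Set String)
    (hf : s.length ≤ fuel) (hp : pre.length ≤ 5) :
    pvGenPerms fuel s pre acc =
      ((pvPermsP (5 - pre.length) s).map (fun q => String.ofList (pre ++ q.1))).foldl PySem.Set.add acc := by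
  induction fuel generalizing s pre acc with
  | zero =>
    by_cases h5 : pre.length = 5
    · simp [pvGenPerms, h5, pvPermsP]
    · have hs : s = [] := by simpa using hf
      subst hs
      rw [show 5 - pre.length = (5 - (pre.length + 1)) + 1 by omega]
      simp [pvGenPerms, h5, pvPermsP]
  | succ fuel' ih =>
    by_cases h5 : pre.length = 5
    · simp [pvGenPerms, h5, pvPermsP]
    · rw [show 5 - pre.length = (5 - (pre.length + 1)) + 1 by omega,
        pvGenPerms, if_neg h5, pvPermsP, List.map_flatMap, pv_foldl_flatMap]
      apply PySem.List.foldl_congr_mem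
      intro a ic hic
      obtain ⟨k, hk, hics⟩ := (PySem.List.mem_enumerate_iff _ _ _).mp hic
      subst hics
      simp only [zero_add]
      rw [pv_rem_eq]
      have hlen : (List.take k s ++ List.drop (k + 1) s).length ≤ fuel' := by
        simp only [List.length_append, List.length_take, List.length_drop]
        omega
      rw [ih _ _ _ hlen (by simp; omega)]
      rw [List.map_map]
      have hl : (pre ++ [s[k]]).length = pre.length + 1 := by simp
      rw [hl]
      congr 1
      apply List.map_congr_left
      intro q _
      simp [List.append_assoc]

-- ===== VERDICT (by name: the statement is the Claim_ definition above) =====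
theorem permutations_generator_spec : Claim_equal_permutations_generator := by
  intro s _
  unfold Spec_permutations_generator permutations_generator permutations_generator_alt
  rw [pv_gen_eq s.toList.length s.toList [] _ le_rfl (by simp)]
  have hr : PySem.List.pyRange 0 5 1 = [0, 1, 2, 3, 4] := by decide
  rw [hr]
  rw [pv_foldl_const_step, show ([0, 1, 2, 3, 4] : List Int).length = 5 from rfl, pv_iter_single]
  rw [PySem.Set.ofList_eq_foldl]
  simp [PySem.Set.empty]
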